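-- pv_equiv track=rewrite | github.com/zeolsem/script-languages-assignments | lista2/src/text_processing/l_lexicographical_sentences.py | is_lexicographical
-- ===== SOURCE A (Python) =====
-- def is_lexicographical(sentence):
--     words = sentence.split()
--     if not words:
--         return False
--
--     latest_word = words[0]
--     if len(words) > 1:
--         for word in words[1:]:
--             if word.lower() < latest_word.lower():
--                 return False
--             else:
--                 latest_word = word
--     return True
-- ===== SOURCE B (Python) =====
-- def is_lexicographical(sentence):
--     lower = [w.lower() for w in sentence.split()]
--     return bool(lower) and lower == sorted(lower)
-- ===== Notes on version B (the rewrite author's own statement) =====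
-- stated objective: simpler
-- what changed: Replaces the explicit latest-word loop with early return by lowercasing once and comparing the lowercased word list to its sorted copy.
import Mathlib
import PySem

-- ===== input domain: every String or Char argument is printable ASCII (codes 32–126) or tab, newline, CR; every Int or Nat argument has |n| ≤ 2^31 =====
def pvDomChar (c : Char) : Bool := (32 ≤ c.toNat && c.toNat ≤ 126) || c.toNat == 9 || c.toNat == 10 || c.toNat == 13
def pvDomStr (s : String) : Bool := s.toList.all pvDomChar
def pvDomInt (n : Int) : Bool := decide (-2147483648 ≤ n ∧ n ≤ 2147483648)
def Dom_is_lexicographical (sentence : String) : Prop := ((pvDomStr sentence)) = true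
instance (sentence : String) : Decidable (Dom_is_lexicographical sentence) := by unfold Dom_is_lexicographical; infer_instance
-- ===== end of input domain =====

-- B lowercases the words once and compares the list to its sorted copy instead of A's
-- pairwise loop with early return; objective: simpler.

-- ===== PORT A =====
-- the for-loop over words[1:] with early return, carrying latest_word
def pvALoop (latest : String) : List String → Bool
  | [] => true
  | w :: rest =>
    if PySem.Str.lower w < PySem.Str.lower latest then false
    else pvALoop w rest

def is_lexicographical (sentence : String) : Bool :=
  let words := PySem.Str.split₀ sentence
  match words with
  | [] => false
  | w :: rest => pvALoop w rest

-- ===== PORT B =====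
def is_lexicographical_alt (sentence : String) : Bool :=
  let lower := (PySem.Str.split₀ sentence).map PySem.Str.lower
  !lower.isEmpty && (lower == PySem.List.sorted lower (fun x => x) false)

-- ===== PRECONDITION & SPEC =====
def Spec_is_lexicographical (sentence : String) (out : Bool) : Prop := out = is_lexicographical_alt sentence
instance (sentence : String) (out : Bool) : Decidable (Spec_is_lexicographical sentence out) := by unfold Spec_is_lexicographical; infer_instance

-- ===== CLAIM (what is proved, stated in full; the proofs are below) =====
def Claim_equal_is_lexicographical : Prop := ∀ (sentence : String), Dom_is_lexicographical sentence → Spec_is_lexicographical sentence (is_lexicographical sentence)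

-- ===== LEMMAS AND PROOFS =====

theorem pvALoop_isChain (latest : String) (rest : List String) :
    pvALoop latest rest = true ↔
      List.IsChain (α := String) (· ≤ ·) ((latest :: rest).map PySem.Str.lower) := by
  induction rest generalizing latest with
  | nil =>
    simp [pvALoop]
  | cons w rest ih =>
    simp only [pvALoop, List.map_cons] at *
    rw [List.isChain_cons_cons]
    split_ifs with h
    · exact iff_of_false (by simp) (fun hc => absurd hc.1 (not_le.mpr h))
    · rw [ih w]
      exact ⟨fun hl => ⟨not_lt.mp h, hl⟩, fun hc => hc.2⟩

theorem pv_sorted_iff (L : List String) :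
    L = PySem.List.sorted L (fun x => x) false ↔ L.Pairwise (· ≤ ·) := by
  constructor
  · intro h
    have hp := PySem.List.sorted_pairwise (xs := L) (key := fun x => x)
    rw [← h] at hp
    exact hp
  · intro h
    exact (PySem.List.sorted_eq_self_of_pairwise L (fun x => x) h).symm

-- ===== VERDICT (by name: the statement is the Claim_ definition above) =====
theorem is_lexicographical_spec : Claim_equal_is_lexicographical := by
  intro sentence _
  unfold Spec_is_lexicographical is_lexicographical is_lexicographical_alt
  cases hws : PySem.Str.split₀ sentence with
  | nil => simp
  | cons w rest =>
    simp only [List.map_cons, List.isEmpty_cons, Bool.not_false, Bool.true_and]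
    have key : pvALoop w rest = true ↔
        (PySem.Str.lower w :: rest.map PySem.Str.lower =
          PySem.List.sorted (PySem.Str.lower w :: rest.map PySem.Str.lower) (fun x => x) false) := by
      rw [pvALoop_isChain, List.map_cons, List.isChain_iff_pairwise,
        ← pv_sorted_iff]
    rw [Bool.eq_iff_iff, beq_iff_eq]
    exact key
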